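-- pv_equiv track=rewrite | github.com/Disce-App/Kleiner-B-r---Feature-Extracting-Prototype-Disce | features_viewer.py | complex_nps_per_sentence
-- ===== SOURCE A (Python) =====
-- def complex_nps_per_sentence(tagged_sentences):
--     """
--     Zählt einfache komplexe Nominalphrasen:
--     - Sequenzen ADJ(*) + NN/NNA (oder ADJ(*) + ADJ(*) + NN/NNA etc.)
--     """
--     counts = []
--     for sent in tagged_sentences:
--         pos_list = [token_tuple[-1] for token_tuple in sent]
--         count = 0
--         i = 0
--         while i < len(pos_list) - 1:
--             if pos_list[i].startswith("ADJ"):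
--                 j = i
--                 saw_adj = False
--                 while j < len(pos_list) and pos_list[j].startswith("ADJ"):
--                     saw_adj = True
--                     j += 1
--                 if j < len(pos_list) and pos_list[j].startswith("NN") and saw_adj:
--                     count += 1
--                     i = j + 1
--                 else:
--                     i += 1
--             else:
--                 i += 1
--         counts.append(count)
--     return counts
-- ===== SOURCE B (Python) =====
-- def complex_nps_per_sentence(tagged_sentences):
--     """
--     Zählt einfache komplexe Nominalphrasen:
--     - Sequenzen ADJ(*) + NN/NNA (oder ADJ(*) + ADJ(*) + NN/NNA etc.)
--     Single pass: a complex NP ends exactly at a tag starting with "NN"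
--     whose immediate predecessor starts with "ADJ".
--     """
--     counts = []
--     for sent in tagged_sentences:
--         pos = [tok[-1] for tok in sent]
--         counts.append(sum(1 for a, b in zip(pos, pos[1:])
--                           if a.startswith("ADJ") and b.startswith("NN")))
--     return counts
-- ===== Notes on version B (the rewrite author's own statement) =====
-- stated objective: simpler
-- what changed: Replaces A's nested while-loops (outer index loop that rescans each unmatched ADJ run position by position, inner ADJ-run scan with a saw_adj flag) by a single comprehension counting adjacent ADJ->NN tag pairs, which is provably the same count since a maximal ADJ run followed by NN contains exactly one such adjacency.
import Mathlib
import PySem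

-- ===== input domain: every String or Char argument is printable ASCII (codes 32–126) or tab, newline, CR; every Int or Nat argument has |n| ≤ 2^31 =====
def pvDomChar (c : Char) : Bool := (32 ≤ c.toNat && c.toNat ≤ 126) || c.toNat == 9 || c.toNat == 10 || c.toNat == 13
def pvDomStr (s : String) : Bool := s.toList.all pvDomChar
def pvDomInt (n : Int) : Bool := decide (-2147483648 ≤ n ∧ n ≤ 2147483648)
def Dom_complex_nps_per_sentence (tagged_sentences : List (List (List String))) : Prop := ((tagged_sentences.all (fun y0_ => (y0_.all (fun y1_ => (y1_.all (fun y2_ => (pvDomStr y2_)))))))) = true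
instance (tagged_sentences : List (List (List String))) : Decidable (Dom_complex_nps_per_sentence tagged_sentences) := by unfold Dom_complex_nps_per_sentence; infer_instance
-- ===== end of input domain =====

-- B replaces A's rescanning while-loop over ADJ runs by one pairwise pass counting ADJ→NN
-- adjacencies (objective: simpler; equivalence is about the return value, no mutation involved).

-- ===== PORT A =====
-- token_tuple[-1] (Pre_ guarantees the token list is nonempty, so pyGet? is some there)
def pvLastTag (t : List String) : String := (PySem.List.pyGet? t (-1)).getD ""

-- inner 'while j < len(pos_list) and pos_list[j].startswith("ADJ")', carrying saw_adj;
-- fuel only bounds the loop (j grows by 1 per step, so fuel = len - j is never exhausted)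
def pvScanAdj (pos : List String) : Nat → Nat → Bool → Nat × Bool
  | 0, j, saw => (j, saw)
  | fuel + 1, j, saw =>
    if j < pos.length ∧ PySem.Str.startswith (pos.getD j "") "ADJ" = true then
      pvScanAdj pos fuel (j + 1) true
    else (j, saw)

-- outer 'while i < len(pos_list) - 1' (i : Nat, so 'i < len - 1' is 'i + 1 < len');
-- fuel only bounds the loop (i grows by at least 1 per iteration, fuel = len suffices)
def pvALoop (pos : List String) : Nat → Nat → Int → Int
  | 0, _, count => count
  | fuel + 1, i, count =>
    if i + 1 < pos.length then
      if PySem.Str.startswith (pos.getD i "") "ADJ" = true then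
        if (pvScanAdj pos (pos.length - i) i false).1 < pos.length ∧
            PySem.Str.startswith (pos.getD (pvScanAdj pos (pos.length - i) i false).1 "") "NN" = true ∧
            (pvScanAdj pos (pos.length - i) i false).2 = true then
          pvALoop pos fuel ((pvScanAdj pos (pos.length - i) i false).1 + 1) (count + 1)
        else
          pvALoop pos fuel (i + 1) count
      else
        pvALoop pos fuel (i + 1) count
    else count

def complex_nps_per_sentence (tagged_sentences : List (List (List String))) : List Int :=
  tagged_sentences.map (fun sent => pvALoop (sent.map pvLastTag) (sent.map pvLastTag).length 0 0)

-- ===== PORT B =====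
-- sum(1 for a, b in zip(pos, pos[1:]) if a.startswith("ADJ") and b.startswith("NN"))
def pvPairCount (pos : List String) : Int :=
  ((pos.zip (PySem.List.slice pos (some 1) none)).countP
    (fun p => PySem.Str.startswith p.1 "ADJ" && PySem.Str.startswith p.2 "NN") : Nat)

def complex_nps_per_sentence_alt (tagged_sentences : List (List (List String))) : List Int :=
  tagged_sentences.map (fun sent => pvPairCount (sent.map pvLastTag))

-- ===== PRECONDITION & SPEC =====
-- Pre_ excludes only inputs on which Python A raises IndexError: a sentence containing an
-- empty token list makes 'token_tuple[-1]' raise.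
def Pre_complex_nps_per_sentence (tagged_sentences : List (List (List String))) : Prop :=
  ∀ sent ∈ tagged_sentences, ∀ tok ∈ sent, tok ≠ []
instance (tagged_sentences : List (List (List String))) : Decidable (Pre_complex_nps_per_sentence tagged_sentences) := by
  unfold Pre_complex_nps_per_sentence; infer_instance

def pvWitness_complex_nps_per_sentence : List (List (List String)) :=
  [[["good", "ADJ"], ["dog", "NN"]], [["runs", "VB"]]]

def Spec_complex_nps_per_sentence (tagged_sentences : List (List (List String))) (out : List Int) : Prop := out = complex_nps_per_sentence_alt tagged_sentences
instance (tagged_sentences : List (List (List String))) (out : List Int) : Decidable (Spec_complex_nps_per_sentence tagged_sentences out) := by unfold Spec_complex_nps_per_sentence; infer_instance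

-- ===== CLAIM (what is proved, stated in full; the proofs are below) =====
def Claim_equal_complex_nps_per_sentence : Prop := ∀ (tagged_sentences : List (List (List String))), Dom_complex_nps_per_sentence tagged_sentences → Pre_complex_nps_per_sentence tagged_sentences → Spec_complex_nps_per_sentence tagged_sentences (complex_nps_per_sentence tagged_sentences)

-- ===== LEMMAS AND PROOFS =====

-- the pair predicate B counts
def pvCond (p : String × String) : Bool :=
  PySem.Str.startswith p.1 "ADJ" && PySem.Str.startswith p.2 "NN"

theorem pv_nn_not_adj (s : String) (h : PySem.Str.startswith s "NN" = true) :
    PySem.Str.startswith s "ADJ" = false := by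
  simp only [PySem.Str.startswith_eq] at *
  rw [PySem.Chars.startswith_iff] at h
  by_contra hc
  rw [Bool.not_eq_false, PySem.Chars.startswith_iff] at hc
  obtain ⟨t1, e1⟩ := h
  obtain ⟨t2, e2⟩ := hc
  rw [← e2] at e1
  simp at e1

theorem pv_adj_not_nn (s : String) (h : PySem.Str.startswith s "ADJ" = true) :
    PySem.Str.startswith s "NN" = false := by
  by_contra hc
  rw [Bool.not_eq_false] at hc
  have := pv_nn_not_adj s hc
  rw [h] at this
  exact absurd this (by simp)

theorem pvScanAdj_ge (pos : List String) (fuel : Nat) : ∀ (j : Nat) (saw : Bool),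
    j ≤ (pvScanAdj pos fuel j saw).1 := by
  induction fuel with
  | zero => intro j saw; simp [pvScanAdj]
  | succ f ih =>
    intro j saw
    simp only [pvScanAdj]
    split
    · exact Nat.le_trans (Nat.le_succ j) (ih (j + 1) true)
    · exact Nat.le_refl j

theorem pvScanAdj_le (pos : List String) (fuel : Nat) : ∀ (j : Nat) (saw : Bool),
    j ≤ pos.length → (pvScanAdj pos fuel j saw).1 ≤ pos.length := by
  induction fuel with
  | zero => intro j saw h; simpa [pvScanAdj] using h
  | succ f ih =>
    intro j saw h
    simp only [pvScanAdj]
    split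
    · next hc => exact ih (j + 1) true (by omega)
    · exact h

theorem pvScanAdj_adj (pos : List String) (fuel : Nat) : ∀ (j : Nat) (saw : Bool) (k : Nat),
    j ≤ k → k < (pvScanAdj pos fuel j saw).1 →
    PySem.Str.startswith (pos.getD k "") "ADJ" = true := by
  induction fuel with
  | zero => intro j saw k hk1 hk2; simp [pvScanAdj] at hk2; omega
  | succ f ih =>
    intro j saw k hk1 hk2
    simp only [pvScanAdj] at hk2
    split at hk2
    · next hc =>
      rcases Nat.eq_or_lt_of_le hk1 with he | hlt
      · exact he ▸ hc.2
      · exact ih (j + 1) true k hlt hk2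
    · omega

theorem pvScanAdj_saw (pos : List String) (fuel : Nat) : ∀ (j : Nat),
    (pvScanAdj pos fuel j true).2 = true := by
  induction fuel with
  | zero => intro j; simp [pvScanAdj]
  | succ f ih =>
    intro j
    simp only [pvScanAdj]
    split
    · exact ih (j + 1)
    · rfl

-- the pairs list B scans, written with tail
theorem pvPairs_getElem (pos : List String) (m : Nat) (h : m + 1 < pos.length) :
    (pos.zip pos.tail)[m]'(by simp [List.length_zip]; omega) =
      (pos.getD m "", pos.getD (m + 1) "") := by
  have h1 : m < pos.length := by omega
  have h2 : m < pos.tail.length := by simp [List.length_tail]; omega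
  simp [List.getElem_zip, List.getElem_tail, List.getD_eq_getElem?_getD, h1, h]

-- one head-uncons step of the count
theorem pvCount_drop_succ (pos : List String) (m : Nat) (h : m + 1 < pos.length) :
    ((pos.zip pos.tail).drop m).countP pvCond =
      (if pvCond (pos.getD m "", pos.getD (m + 1) "") then 1 else 0) +
        ((pos.zip pos.tail).drop (m + 1)).countP pvCond := by
  have hm : m < (pos.zip pos.tail).length := by simp [List.length_zip, List.length_tail]; omega
  rw [List.drop_eq_getElem_cons hm, List.countP_cons, pvPairs_getElem pos m h]
  split
  · simp_all
    omega
  · simp_all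

-- past the pairs list both drops are empty
theorem pvCount_drop_big (pos : List String) (m : Nat) (h : pos.length ≤ m + 1) :
    ((pos.zip pos.tail).drop m).countP pvCond = 0 := by
  rw [List.drop_eq_nil_of_le (by simp [List.length_zip, List.length_tail]; omega)]
  rfl

-- an NN position contributes no pair as FIRST component
theorem pvCount_drop_nn (pos : List String) (j : Nat) (hj : j < pos.length)
    (hnn : PySem.Str.startswith (pos.getD j "") "NN" = true) :
    ((pos.zip pos.tail).drop j).countP pvCond =
      ((pos.zip pos.tail).drop (j + 1)).countP pvCond := by
  by_cases h : j + 1 < pos.length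
  · rw [pvCount_drop_succ pos j h]
    have hf : pvCond (pos.getD j "", pos.getD (j + 1) "") = false := by
      simp only [pvCond, pv_nn_not_adj _ hnn, Bool.false_and]
    rw [hf]
    simp
  · rw [pvCount_drop_big pos j (by omega), pvCount_drop_big pos (j + 1) (by omega)]

-- a maximal ADJ run [m, j) ending at an NN contributes exactly one pair
theorem pvRunCount (pos : List String) (j : Nat) (hjlen : j < pos.length)
    (hnn : PySem.Str.startswith (pos.getD j "") "NN" = true) (m : Nat) (hmj : m < j)
    (hadj : ∀ k, m ≤ k → k < j → PySem.Str.startswith (pos.getD k "") "ADJ" = true) :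
    ((pos.zip pos.tail).drop m).countP pvCond =
      1 + ((pos.zip pos.tail).drop (j + 1)).countP pvCond := by
  have hm1 : m + 1 < pos.length := by omega
  rw [pvCount_drop_succ pos m hm1]
  rcases Nat.eq_or_lt_of_le (Nat.succ_le_of_lt hmj) with he | hlt
  · -- m + 1 = j : the pair (pos[m], pos[j]) is ADJ→NN, then skip the NN head
    have he' : m + 1 = j := he
    rw [he', pvCount_drop_nn pos j hjlen hnn]
    have ht : pvCond (pos.getD m "", pos.getD j "") = true := by
      simp only [pvCond, hadj m (Nat.le_refl m) hmj, Bool.true_and, hnn]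
    rw [ht]
    simp
  · -- m + 1 < j : pair (ADJ, ADJ) fails, recurse
    have hf : pvCond (pos.getD m "", pos.getD (m + 1) "") = false := by
      simp only [pvCond, pv_adj_not_nn _ (hadj (m + 1) (by omega) hlt), Bool.and_false]
    rw [hf]
    simp only [Bool.false_eq_true, if_false, Nat.zero_add]
    exact pvRunCount pos j hjlen hnn (m + 1) hlt (fun k hk1 hk2 => hadj k (by omega) hk2)
termination_by j - m
decreasing_by omega

-- A's outer loop computes count plus B's count over the remaining pairs
theorem pvALoop_eq_aux (pos : List String) : ∀ (fuel i : Nat) (count : Int),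
    pos.length ≤ fuel + i + 1 →
    pvALoop pos fuel i count = count + (((pos.zip pos.tail).drop i).countP pvCond : Int) := by
  intro fuel
  induction fuel with
  | zero =>
    intro i count hf
    rw [pvCount_drop_big pos i (by omega)]
    simp [pvALoop]
  | succ f ih =>
    intro i count hf
    simp only [pvALoop]
    split
    · next hi =>
      by_cases hadj : PySem.Str.startswith (pos.getD i "") "ADJ" = true
      · rw [if_pos hadj]
        have hge : i ≤ (pvScanAdj pos (pos.length - i) i false).1 :=
          pvScanAdj_ge pos (pos.length - i) i false
        have hle : (pvScanAdj pos (pos.length - i) i false).1 ≤ pos.length :=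
          pvScanAdj_le pos (pos.length - i) i false (by omega)
        -- the first iteration runs: pos[i] is ADJ and i < len
        have hstep : pvScanAdj pos (pos.length - i) i false =
            pvScanAdj pos (pos.length - (i + 1)) (i + 1) true := by
          have h2 : pos.length - i = (pos.length - (i + 1)) + 1 := by omega
          rw [h2]
          simp only [pvScanAdj]
          rw [if_pos ⟨by omega, hadj⟩]
        have hsaw : (pvScanAdj pos (pos.length - i) i false).2 = true := by
          rw [hstep]; exact pvScanAdj_saw pos (pos.length - (i + 1)) (i + 1)
        have hgt : i < (pvScanAdj pos (pos.length - i) i false).1 := by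
          have := pvScanAdj_ge pos (pos.length - (i + 1)) (i + 1) true
          rw [hstep]; omega
        have hrun : ∀ k, i ≤ k → k < (pvScanAdj pos (pos.length - i) i false).1 →
            PySem.Str.startswith (pos.getD k "") "ADJ" = true :=
          pvScanAdj_adj pos (pos.length - i) i false
        split
        · next hmatch =>
          rw [ih ((pvScanAdj pos (pos.length - i) i false).1 + 1) (count + 1) (by omega)]
          rw [pvRunCount pos (pvScanAdj pos (pos.length - i) i false).1 hmatch.1
            hmatch.2.1 i hgt hrun]
          push_cast; ring
        · next hnomatch =>
          rw [ih (i + 1) count (by omega)]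
          -- the pair at i fails: pos[i+1] is either ADJ (run continues) or the non-NN stop
          have hfail : pvCond (pos.getD i "", pos.getD (i + 1) "") = false := by
            rcases Nat.eq_or_lt_of_le (Nat.succ_le_of_lt hgt) with he | hlt
            · -- i + 1 is the stop position, inside the list but not NN
              have he' : i + 1 = (pvScanAdj pos (pos.length - i) i false).1 := he
              have hr1 : (pvScanAdj pos (pos.length - i) i false).1 < pos.length := by omega
              have hnn : PySem.Str.startswith
                  (pos.getD (pvScanAdj pos (pos.length - i) i false).1 "") "NN" = false := by
                cases hb : PySem.Str.startswith
                    (pos.getD (pvScanAdj pos (pos.length - i) i false).1 "") "NN"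
                · rfl
                · exact absurd ⟨hr1, hb, hsaw⟩ hnomatch
              simp only [pvCond, he', hnn, Bool.and_false]
            · simp only [pvCond, pv_adj_not_nn _ (hrun (i + 1) (by omega) hlt), Bool.and_false]
          rw [pvCount_drop_succ pos i hi, hfail]
          simp
      · have hA : PySem.Str.startswith (pos.getD i "") "ADJ" = false := by
          cases hb : PySem.Str.startswith (pos.getD i "") "ADJ"
          · rfl
          · exact absurd hb hadj
        have hf2 : pvCond (pos.getD i "", pos.getD (i + 1) "") = false := by
          simp only [pvCond, hA, Bool.false_and]
        rw [if_neg hadj, ih (i + 1) count (by omega), pvCount_drop_succ pos i hi, hf2]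
        simp
    · next hi =>
      rw [pvCount_drop_big pos i (by omega)]
      simp

theorem pvSentence_eq (pos : List String) : pvALoop pos pos.length 0 0 = pvPairCount pos := by
  rw [pvALoop_eq_aux pos pos.length 0 0 (by omega), pvPairCount,
    PySem.List.slice_from_one, List.drop_zero, Int.zero_add]
  rfl

-- ===== VERDICT (by name: the statement is the Claim_ definition above) =====
theorem complex_nps_per_sentence_spec : Claim_equal_complex_nps_per_sentence := by
  intro ts _ _
  unfold Spec_complex_nps_per_sentence complex_nps_per_sentence complex_nps_per_sentence_alt
  exact List.map_congr_left (fun sent _ => pvSentence_eq (sent.map pvLastTag))
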